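-- pv_equiv track=rewrite | github.com/KaimuSeino/python_basic | memo/map_num.py | d_4
-- ===== SOURCE A (Python) =====
-- def d_4(h, w):
--   # D = 4
--   result = [[0] * w for _ in range(h)]
--   num = 1
--   for s in range(h + w - 1):
--     for y in range(h):
--       x = s - y
--       if 0 <= x < w:
--         result[y][x] = num
--         num += 1
--
--   return result
-- ===== SOURCE B (Python) =====
-- def d_4(h, w):
--     # Per-diagonal start numbers computed once, then each row built directly
--     # by a closed-form index into them (no scan over all rows per diagonal).
--     starts = []
--     acc = 1
--     for s in range(h + w - 1):
--         starts.append(acc)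
--         acc += min(s, h - 1, w - 1, h + w - 2 - s) + 1
--     return [[starts[y + x] + y - max(0, y + x - w + 1) for x in range(w)]
--             for y in range(h)]
-- ===== Notes on version B (the rewrite author's own statement) =====
-- stated objective: alternative
-- what changed: Instead of scanning all h rows for every diagonal and mutating a grid cell-by-cell, B computes each diagonal's first number in one running pass and then builds every row directly from a closed-form per-cell value.
import Mathlib
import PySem

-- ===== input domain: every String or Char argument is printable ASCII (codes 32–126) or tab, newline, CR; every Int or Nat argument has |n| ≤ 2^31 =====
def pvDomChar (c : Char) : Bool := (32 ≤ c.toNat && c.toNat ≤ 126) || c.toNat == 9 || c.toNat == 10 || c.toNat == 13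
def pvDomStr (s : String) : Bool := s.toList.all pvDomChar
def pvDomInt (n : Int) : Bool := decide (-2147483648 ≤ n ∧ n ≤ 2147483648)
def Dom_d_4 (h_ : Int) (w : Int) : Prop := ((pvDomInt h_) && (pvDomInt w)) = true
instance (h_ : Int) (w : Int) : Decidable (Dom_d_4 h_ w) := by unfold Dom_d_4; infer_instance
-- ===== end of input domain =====

-- B replaces A's scan of all h rows for every diagonal by one pass computing per-diagonal
-- start numbers plus a closed-form value per cell, built row by row (objective: alternative).


-- ===== PORT A =====
def d_4 (h_ : Int) (w : Int) : List (List Int) :=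
  -- result = [[0] * w for _ in range(h)]
  let result : List (List Int) :=
    (PySem.List.pyRange 0 h_ 1).map (fun _ => List.replicate w.toNat (0 : Int))
  -- num = 1; the two nested for-loops thread the state (result, num)
  let st :=
    (PySem.List.pyRange 0 (h_ + w - 1) 1).foldl (fun st s =>
      (PySem.List.pyRange 0 h_ 1).foldl (fun st y =>
        let x := s - y
        if 0 ≤ x ∧ x < w then
          (PySem.List.pySetD st.1 y
            (PySem.List.pySetD (PySem.List.pyGetD st.1 y []) x st.2), st.2 + 1)
        else st) st) (result, (1 : Int))
  st.1

-- ===== PORT B =====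
def d_4_alt (h_ : Int) (w : Int) : List (List Int) :=
  -- starts: first number of each diagonal, accumulated in one running pass
  let st :=
    (PySem.List.pyRange 0 (h_ + w - 1) 1).foldl
      (fun (st : List Int × Int) s =>
        (st.2 :: st.1,   -- the O(1) list.append, list kept reversed
         st.2 + min (min s (h_ - 1)) (min (w - 1) (h_ + w - 2 - s)) + 1))
      ([], (1 : Int))
  let starts := st.1.reverse
  -- each row built directly from the closed-form cell value
  (PySem.List.pyRange 0 h_ 1).map (fun y =>
    (PySem.List.pyRange 0 w 1).map (fun x =>
      PySem.List.pyGetD starts (y + x) 0 + y - max 0 (y + x - w + 1)))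

-- ===== PRECONDITION & SPEC =====
def Spec_d_4 (h_ : Int) (w : Int) (out : List (List Int)) : Prop := out = d_4_alt h_ w
instance (h_ : Int) (w : Int) (out : List (List Int)) : Decidable (Spec_d_4 h_ w out) := by unfold Spec_d_4; infer_instance

-- ===== CLAIM (what is proved, stated in full; the proofs are below) =====
def Claim_equal_d_4 : Prop := ∀ (h_ : Int) (w : Int), Dom_d_4 h_ w → Spec_d_4 h_ w (d_4 h_ w)

-- ===== LEMMAS AND PROOFS =====

-- number of grid cells on diagonal s (those with x + y = s), as B computes it
def lenD (h_ w s : Int) : Int := min (min s (h_ - 1)) (min (w - 1) (h_ + w - 2 - s)) + 1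

-- first number written on diagonal k
def startN (h_ w : Int) : Nat → Int
  | 0 => 1
  | (k+1) => startN h_ w k + lenD h_ w k

-- the value the finished grid holds at cell (y, x)
def valC (h_ w : Int) (y x : Int) : Int :=
  startN h_ w (y + x).toNat + y - max 0 (y + x - w + 1)

-- row y of A's grid while diagonal n is being processed and rows y' < m have been visited
def rowMid (h_ w : Int) (n m y : Nat) : List Int :=
  (List.range w.toNat).map (fun (x : Nat) =>
    if ((x : Int) + (y : Int)) < (n : Int) ∨ (((x : Int) + (y : Int)) = (n : Int) ∧ y < m)
    then valC h_ w (y : Int) (x : Int) else 0)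

def gridMid (h_ w : Int) (n m : Nat) : List (List Int) :=
  (List.range h_.toNat).map (fun (y : Nat) => rowMid h_ w n m y)

-- how many cells of diagonal n lie in rows y < m
def cnt (w : Int) (n m : Nat) : Int :=
  max 0 (min (m : Int) ((n : Int) + 1) - max 0 ((n : Int) - w + 1))

-- A's inner-loop body
def innerStep (w : Int) (s : Int) (st : List (List Int) × Int) (y : Int) :
    List (List Int) × Int :=
  let x := s - y
  if 0 ≤ x ∧ x < w then
    (PySem.List.pySetD st.1 y
      (PySem.List.pySetD (PySem.List.pyGetD st.1 y []) x st.2), st.2 + 1)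
  else st

lemma rowMid_congr (h_ w : Int) (n m m' y : Nat)
    (h : ∀ x : Nat, (x : Int) < w →
      ((((x : Int) + (y : Int)) = (n : Int) ∧ y < m) ↔ (((x : Int) + (y : Int)) = (n : Int) ∧ y < m'))) :
    rowMid h_ w n m y = rowMid h_ w n m' y := by
  unfold rowMid
  apply List.map_congr_left
  intro x hx
  simp only [List.mem_range] at hx
  have hxw : (x : Int) < w := by omega
  congr 1
  simp only [eq_iff_iff]
  have := h x hxw
  tauto

lemma inner_inv (h_ w : Int) (hw : 1 ≤ w) (n : Nat)
    (m : Nat) (hm : m ≤ h_.toNat) :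
    (List.range m).foldl (fun st (yk : Nat) => innerStep w (n : Int) st (yk : Int))
      (gridMid h_ w n 0, startN h_ w n + cnt w n 0)
    = (gridMid h_ w n m, startN h_ w n + cnt w n m) := by
  induction m with
  | zero => rfl
  | succ m ih =>
    rw [List.range_succ, List.foldl_append, ih (by omega)]
    simp only [List.foldl_cons, List.foldl_nil]
    unfold innerStep
    by_cases hc : (0 : Int) ≤ (n : Int) - (m : Int) ∧ (n : Int) - (m : Int) < w
    · -- row m receives a number at column n - m
      rw [if_pos hc]
      have hmh : m < h_.toNat := by omega
      have hrow : PySem.List.pyGetD (gridMid h_ w n m) (m : Int) [] = rowMid h_ w n m m := by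
        rw [PySem.List.pyGetD_natCast]
        unfold gridMid
        rw [List.getD_eq_getElem _ _ (by simpa using hmh)]
        simp
      have hcnt : startN h_ w n + cnt w n m = valC h_ w (m : Int) ((n : Int) - (m : Int)) := by
        unfold valC cnt
        have h1 : ((m : Int) + ((n : Int) - (m : Int))).toNat = n := by omega
        rw [h1]
        omega
      refine Prod.ext ?_ ?_
      · -- grid component
        simp only
        rw [hrow, hcnt]
        rw [PySem.List.pySetD_natCast]
        rw [show ((n : Int) - (m : Int)) = (((n - m : Nat) : Int)) by omega]
        rw [PySem.List.pySetD_natCast]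
        unfold gridMid
        apply List.ext_getElem (by simp)
        intro y hy1 hy2
        simp only [List.length_set, List.length_map, List.length_range] at hy1 hy2
        rw [List.getElem_map, List.getElem_range, List.getElem_set]
        by_cases hym : m = y
        · rw [if_pos hym]
          subst hym
          unfold rowMid
          apply List.ext_getElem (by simp)
          intro x hx1 hx2
          simp only [List.length_set, List.length_map, List.length_range] at hx1 hx2
          rw [List.getElem_map, List.getElem_range, List.getElem_set]
          by_cases hxm : n - m = x
          · rw [if_pos hxm]
            rw [if_pos (by omega)]
            congr 1
            omega
          · rw [if_neg hxm, List.getElem_map, List.getElem_range]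
            congr 1
            simp only [eq_iff_iff]
            omega
        · rw [if_neg hym, List.getElem_map, List.getElem_range]
          apply rowMid_congr
          intro x hxw
          omega
      · simp only
        unfold cnt
        omega
    · -- no cell of diagonal n lies in row m
      rw [if_neg hc]
      refine Prod.ext ?_ ?_
      · simp only
        unfold gridMid
        apply List.map_congr_left
        intro y hy
        apply rowMid_congr
        intro x hxw
        have hx0 : (0 : Int) ≤ (x : Int) := by omega
        constructor
        · rintro ⟨h1, h2⟩; exact ⟨h1, by omega⟩
        · rintro ⟨h1, h2⟩
          refine ⟨h1, ?_⟩
          rcases Nat.lt_succ_iff_lt_or_eq.mp h2 with h3 | h3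
          · exact h3
          · exfalso; apply hc; subst h3; omega
      · simp only
        congr 1
        unfold cnt
        omega

lemma rowMid_full (h_ w : Int) (n y : Nat) (hy : y < h_.toNat) :
    rowMid h_ w n h_.toNat y = rowMid h_ w (n+1) 0 y := by
  unfold rowMid
  apply List.map_congr_left
  intro x hx
  congr 1
  simp only [eq_iff_iff]
  omega

lemma diag_step (h_ w : Int) (hh : 1 ≤ h_) (hw : 1 ≤ w) (n : Nat) (hn : (n : Int) < h_ + w - 1) :
    (List.range h_.toNat).foldl (fun st (yk : Nat) => innerStep w (n : Int) st (yk : Int))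
      (gridMid h_ w n 0, startN h_ w n)
    = (gridMid h_ w (n+1) 0, startN h_ w (n+1)) := by
  have h0 : cnt w n 0 = 0 := by unfold cnt; omega
  have h1 : startN h_ w n = startN h_ w n + cnt w n 0 := by omega
  rw [h1, inner_inv h_ w hw n h_.toNat (le_refl _)]
  refine Prod.ext ?_ ?_
  · simp only
    unfold gridMid
    apply List.map_congr_left
    intro y hy
    exact rowMid_full h_ w n y (by simpa using hy)
  · simp only [startN]
    unfold cnt lenD
    omega

lemma outer_inv (h_ w : Int) (hh : 1 ≤ h_) (hw : 1 ≤ w) (N : Nat) (hN : (N : Int) ≤ h_ + w - 1) :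
    (List.range N).foldl
      (fun st (k : Nat) =>
        (List.range h_.toNat).foldl (fun st (yk : Nat) => innerStep w (k : Int) st (yk : Int)) st)
      (gridMid h_ w 0 0, 1)
    = (gridMid h_ w N 0, startN h_ w N) := by
  induction N with
  | zero => rfl
  | succ n ih =>
    rw [List.range_succ, List.foldl_append, ih (by omega)]
    simp only [List.foldl_cons, List.foldl_nil]
    exact diag_step h_ w hh hw n (by omega)

lemma row0 (h_ w : Int) (y : Nat) : rowMid h_ w 0 0 y = List.replicate w.toNat 0 := by
  unfold rowMid
  rw [show (List.replicate w.toNat (0:Int)) = List.replicate (List.range w.toNat).length (0:Int) by simp]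
  rw [← List.map_const']
  apply List.map_congr_left
  intro x hx
  rw [if_neg (by omega)]

lemma a_main (h_ w : Int) (hh : 1 ≤ h_) (hw : 1 ≤ w) :
    d_4 h_ w = gridMid h_ w (h_ + w - 1).toNat 0 := by
  unfold d_4
  simp only [PySem.List.pyRange_one, List.foldl_map, List.map_map, zero_add, sub_zero,
    Function.comp_def]
  have hinit : (List.range h_.toNat).map (fun _ => List.replicate w.toNat (0:Int))
      = gridMid h_ w 0 0 := by
    unfold gridMid
    apply List.map_congr_left
    intro y _
    exact (row0 h_ w y).symm
  rw [hinit]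
  exact congrArg Prod.fst (outer_inv h_ w hh hw (h_ + w - 1).toNat (by omega))

lemma deg_w (h_ w : Int) (hw : w ≤ 0) :
    d_4 h_ w = (List.range h_.toNat).map (fun _ => ([] : List Int)) := by
  unfold d_4
  simp only [PySem.List.pyRange_one, List.foldl_map, List.map_map, zero_add, sub_zero,
    Function.comp_def]
  have hw0 : w.toNat = 0 := by omega
  refine (congrArg Prod.fst (List.foldl_fixed' ?_ _)).trans ?_
  · intro k
    exact List.foldl_fixed' (fun yk => if_neg (by omega)) _
  · simp [hw0]

lemma deg_h (h_ w : Int) (hh : h_ ≤ 0) :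
    d_4 h_ w = [] := by
  unfold d_4
  simp only [PySem.List.pyRange_one, List.foldl_map, List.map_map, zero_add, sub_zero,
    Function.comp_def]
  have h0 : h_.toNat = 0 := by omega
  simp only [h0, List.range_zero, List.map_nil, List.foldl_nil]
  exact congrArg Prod.fst (List.foldl_fixed' (fun k => rfl) _)

lemma alt_starts (h_ w : Int) (N : Nat) :
    (List.range N).foldl
      (fun (st : List Int × Int) (k : Nat) =>
        (st.2 :: st.1,
         st.2 + min (min (k : Int) (h_ - 1)) (min (w - 1) (h_ + w - 2 - (k : Int))) + 1))
      ([], (1 : Int))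
    = (((List.range N).map (fun k => startN h_ w k)).reverse, startN h_ w N) := by
  induction N with
  | zero => simp [startN]
  | succ n ih =>
    rw [List.range_succ, List.foldl_append, ih]
    simp [startN, lenD]
    ring

lemma alt_eq (h_ w : Int) :
    d_4_alt h_ w
    = (List.range h_.toNat).map (fun (y : Nat) =>
        (List.range w.toNat).map (fun (x : Nat) => valC h_ w (y : Int) (x : Int))) := by
  unfold d_4_alt
  simp only [PySem.List.pyRange_one, List.foldl_map, List.map_map, zero_add, sub_zero]
  rw [alt_starts]
  simp only [List.reverse_reverse]
  apply List.map_congr_left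
  intro y hy
  simp only [Function.comp]
  apply List.map_congr_left
  intro x hx
  simp only [List.mem_range] at hy hx
  have hlen : ((y:Nat) + x) < (h_ + w - 1).toNat := by omega
  simp only [Function.comp_apply]
  rw [show ((y:Int) + (x:Int)) = (((y + x : Nat) : Int)) by push_cast; ring]
  rw [PySem.List.pyGetD_natCast]
  rw [List.getD_eq_getElem _ _ (by simpa using hlen)]
  have hyx : ((y:Int) + (x:Int)).toNat = y + x := by omega
  simp only [List.getElem_map, List.getElem_range, valC, hyx]
  push_cast
  ring

lemma a_eq_alt (h_ w : Int) : d_4 h_ w = d_4_alt h_ w := by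
  rw [alt_eq]
  by_cases hh : 1 ≤ h_
  · by_cases hw : 1 ≤ w
    · rw [a_main h_ w hh hw]
      unfold gridMid rowMid
      apply List.map_congr_left
      intro y hy
      apply List.map_congr_left
      intro x hx
      simp only [List.mem_range] at hy hx
      rw [if_pos (Or.inl (by omega))]
    · rw [deg_w h_ w (by omega)]
      have hw0 : w.toNat = 0 := by omega
      simp [hw0]
  · rw [deg_h h_ w (by omega)]
    have h0 : h_.toNat = 0 := by omega
    simp [h0]

-- ===== VERDICT (by name: the statement is the Claim_ definition above) =====
theorem d_4_spec : Claim_equal_d_4 := by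
  intro h_ w _
  unfold Spec_d_4
  exact a_eq_alt h_ w
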